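-- pv_equiv track=rewrite | github.com/LineG/ADA_472 | next_moves.py | compare_2_boards
-- ===== SOURCE A (Python) =====
-- def white_at(b,r,N):
--     count  = 0
--     for i in range(N):
--         if (b[i] == 0 ):
--             count = count+1
--             if (count == r):
--                 return i
--     return N+1
--
-- def compare_2_boards(b1,b2,N):
--     r = 1
--     while r < N :
--         val1 = white_at(b1,r,N)
--         val2  = white_at(b2,r,N)
--         #b2 has priority
--         if val1 > val2:
--             return False
--         #b1 has priority (or the 2 have the exact same set up)
--         elif val2 > val1:
--             return True
--         else:
--             r = r+1
--     #they are the same give priority to the first board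
--     return True
-- ===== SOURCE B (Python) =====
-- def compare_2_boards(b1, b2, N):
--     if N <= 1:
--         return True
--     z1 = [i for i, x in enumerate(b1[:N]) if x == 0][:N-1]
--     z2 = [i for i, x in enumerate(b2[:N]) if x == 0][:N-1]
--     for x, y in zip(z1, z2):
--         if x != y:
--             return x < y
--     return len(z1) >= len(z2)
-- ===== Notes on version B (the rewrite author's own statement) =====
-- stated objective: faster
-- what changed: A rescans the whole board from index 0 for every rank r (white_at inside a while loop); B builds each board's list of zero positions once and compares the two lists lexicographically in a single pass.
-- outside the precondition, e.g. on compare_2_boards([0, 0], [0, 0], 3): A returns True, B returns True; on compare_2_boards([], [], 2): A raises IndexError, B returns True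
import Mathlib
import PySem

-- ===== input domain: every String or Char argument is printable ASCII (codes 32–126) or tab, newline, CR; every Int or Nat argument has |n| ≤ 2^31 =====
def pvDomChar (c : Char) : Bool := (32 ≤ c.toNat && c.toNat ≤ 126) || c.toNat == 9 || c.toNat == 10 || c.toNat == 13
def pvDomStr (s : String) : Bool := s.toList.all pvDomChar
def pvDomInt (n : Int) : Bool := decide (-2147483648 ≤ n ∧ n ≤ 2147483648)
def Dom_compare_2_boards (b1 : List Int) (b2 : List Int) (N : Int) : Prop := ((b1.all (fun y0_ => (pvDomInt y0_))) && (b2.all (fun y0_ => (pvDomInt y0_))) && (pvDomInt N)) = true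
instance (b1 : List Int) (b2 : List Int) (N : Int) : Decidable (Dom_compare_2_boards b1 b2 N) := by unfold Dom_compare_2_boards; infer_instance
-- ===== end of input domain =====

-- B replaces A's repeated O(N) scans for each r-th white cell by two zero-position
-- lists computed once and one lexicographic pass (objective: faster, asymptotic).

-- ===== PORT A =====
-- 'for i in range(N): if b[i]==0: …' ; none = IndexError from b[i]
def white_at_go (b : List Int) (r N : Int) : List Int → Int → Option Int
  | [], _count => some (N + 1)
  | i :: is, count =>
      match PySem.List.pyGet? b i with
      | none => none
      | some v =>
        if v == 0 then
          if count + 1 == r then some i else white_at_go b r N is (count + 1)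
        else white_at_go b r N is count

def white_at (b : List Int) (r N : Int) : Option Int :=
  white_at_go b r N (PySem.List.pyRange 0 N 1) 0

-- 'while r < N' runs at most (N-1) iterations (r = 1,…,N-1); fuel counts them exactly
def cmp_go (b1 b2 : List Int) (N : Int) : Nat → Int → Option Bool
  | 0, _r => some true
  | fuel + 1, r =>
    match white_at b1 r N, white_at b2 r N with
    | some v1, some v2 =>
      if v1 > v2 then some false
      else if v2 > v1 then some true
      else cmp_go b1 b2 N fuel (r + 1)
    | _, _ => none

def compare_2_boards (b1 : List Int) (b2 : List Int) (N : Int) : Bool :=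
  (cmp_go b1 b2 N (N - 1).toNat 1).getD false

-- ===== PORT B =====
-- '[i for i, x in enumerate(b[:N]) if x == 0]'
def zerosOf (b : List Int) (N : Int) : List Int :=
  (PySem.List.enumerate (PySem.List.slice b none (some N))).filterMap
    (fun p => if p.2 == 0 then some p.1 else none)

-- 'for x, y in zip(z1, z2): if x != y: return x < y' then 'return len(z1) >= len(z2)'
def bloop : List Int → List Int → Bool
  | x :: xs, y :: ys => if x != y then decide (x < y) else bloop xs ys
  | xs, ys => decide (ys.length ≤ xs.length)

def compare_2_boards_alt (b1 : List Int) (b2 : List Int) (N : Int) : Bool :=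
  if N ≤ 1 then true
  else
    bloop (PySem.List.slice (zerosOf b1 N) none (some (N - 1)))
          (PySem.List.slice (zerosOf b2 N) none (some (N - 1)))

-- ===== PRECONDITION & SPEC =====
-- Pre_ excludes boards shorter than N (for N > 1), on which A's b[i] scan can raise
-- IndexError; this also excludes some short zero-dense boards on which A happens to
-- return before reaching an out-of-range index (see claim cites).
def Pre_compare_2_boards (b1 : List Int) (b2 : List Int) (N : Int) : Prop :=
  N ≤ 1 ∨ (N ≤ (b1.length : Int) ∧ N ≤ (b2.length : Int))
instance (b1 : List Int) (b2 : List Int) (N : Int) : Decidable (Pre_compare_2_boards b1 b2 N) := by unfold Pre_compare_2_boards; infer_instance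

def pvWitness_compare_2_boards : List Int × List Int × Int := ([0, 1], [1, 0], 2)

def Spec_compare_2_boards (b1 : List Int) (b2 : List Int) (N : Int) (out : Bool) : Prop := out = compare_2_boards_alt b1 b2 N
instance (b1 : List Int) (b2 : List Int) (N : Int) (out : Bool) : Decidable (Spec_compare_2_boards b1 b2 N out) := by unfold Spec_compare_2_boards; infer_instance

-- ===== CLAIM (what is proved, stated in full; the proofs are below) =====
def Claim_equal_compare_2_boards : Prop := ∀ (b1 : List Int) (b2 : List Int) (N : Int), Dom_compare_2_boards b1 b2 N → Pre_compare_2_boards b1 b2 N → Spec_compare_2_boards b1 b2 N (compare_2_boards b1 b2 N)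

-- ===== LEMMAS AND PROOFS =====

-- indices i of is with b[i] == 0 (proof-side mirror of what white_at_go scans)
def zl (b : List Int) (is : List Int) : List Int :=
  is.filterMap (fun i => if PySem.List.pyGet? b i = some 0 then some i else none)

lemma go_eq (b : List Int) (N : Int) : ∀ (is : List Int) (count r : Int),
    (∀ i ∈ is, (PySem.List.pyGet? b i).isSome) → count < r →
    white_at_go b r N is count = some (((zl b is)[(r - count - 1).toNat]?).getD (N + 1)) := by
  intro is
  induction is with
  | nil => intro count r _ _; simp [white_at_go, zl]
  | cons i is ih =>
    intro count r hmem hcr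
    obtain ⟨v, hv⟩ := Option.isSome_iff_exists.mp (hmem i (by simp))
    rw [show white_at_go b r N (i :: is) count =
        (match PySem.List.pyGet? b i with
         | none => none
         | some v =>
           if v == 0 then
             if count + 1 == r then some i else white_at_go b r N is (count + 1)
           else white_at_go b r N is count) from rfl, hv]
    by_cases hv0 : v = 0
    · subst hv0
      have hz : zl b (i :: is) = i :: zl b is := by simp [zl, hv]
      rw [hz]
      by_cases hcr1 : count + 1 = r
      · have : (r - count - 1).toNat = 0 := by omega
        simp [hcr1, this]
      · have hlt : count + 1 < r := by omega
        have : (r - count - 1).toNat = (r - (count + 1) - 1).toNat + 1 := by omega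
        simp only [beq_iff_eq, hcr1, if_true, if_false, this]
        rw [ih (count + 1) r (fun j hj => hmem j (by simp [hj])) hlt]
        simp
    · have hz : zl b (i :: is) = zl b is := by
        simp [zl, hv, hv0]
      simp only [beq_iff_eq, hv0, if_false, hz]
      exact ih count r (fun j hj => hmem j (by simp [hj])) hcr

lemma white_at_eq (b : List Int) (N : Int) (hlen : N ≤ (b.length : Int)) (k : Nat) :
    white_at b ((k : Int) + 1) N
      = some (((zl b (PySem.List.pyRange 0 N 1))[k]?).getD (N + 1)) := by
  have hmem : ∀ i ∈ PySem.List.pyRange 0 N 1, (PySem.List.pyGet? b i).isSome := by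
    intro i hi
    rw [PySem.List.mem_pyRange_one] at hi
    have : PySem.List.pyGet? b i = b[i.toNat]? := PySem.List.pyGet?_of_nonneg b hi.1
    simp [this]
    omega
  have := go_eq b N (PySem.List.pyRange 0 N 1) 0 ((k : Int) + 1) hmem (by omega)
  simpa using this

lemma zl_mem_lt (b : List Int) (N : Int) :
    ∀ x ∈ zl b (PySem.List.pyRange 0 N 1), 0 ≤ x ∧ x < N := by
  intro x hx
  simp only [zl, List.mem_filterMap] at hx
  obtain ⟨i, hi, hif⟩ := hx
  rw [PySem.List.mem_pyRange_one] at hi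
  by_cases h : PySem.List.pyGet? b i = some 0
  · simp [h] at hif; omega
  · simp [h] at hif

lemma bridge_aux (b : List Int) (N : Int) (hlen : N ≤ (b.length : Int)) :
    ∀ (k j : Nat), j + k = N.toNat →
    (PySem.List.enumerate ((b.take N.toNat).drop j) (j : Int)).filterMap
        (fun p => if p.2 == 0 then some p.1 else none)
      = zl b (PySem.List.pyRange (j : Int) N 1) := by
  intro k
  induction k with
  | zero =>
    intro j hj
    have h1 : (b.take N.toNat).drop j = [] := by
      apply List.drop_eq_nil_of_le
      simp; omega
    have h2 : PySem.List.pyRange (j : Int) N 1 = [] := by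
      apply PySem.List.pyRange_one_eq_nil; omega
    simp [h1, h2, zl]
  | succ k ih =>
    intro j hj
    have hjlen : j < b.length := by omega
    have hjt : j < (b.take N.toNat).length := by simp; omega
    have hsplit : (b.take N.toNat).drop j = b[j] :: (b.take N.toNat).drop (j + 1) := by
      rw [List.drop_eq_getElem_cons hjt]
      congr 1
      simp [List.getElem_take]
    have hget : PySem.List.pyGet? b (j : Int) = some b[j] := by
      rw [PySem.List.pyGet?_natCast]
      simp [hjlen]
    rw [hsplit, PySem.List.enumerate_cons, List.filterMap_cons,
        PySem.List.pyRange_one_cons (show (j : Int) < N by omega)]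
    have htl : (PySem.List.enumerate ((b.take N.toNat).drop (j + 1)) ((j : Int) + 1)).filterMap
        (fun p => if p.2 == 0 then some p.1 else none)
        = zl b (PySem.List.pyRange ((j : Int) + 1) N 1) := by
      have := ih (j + 1) (by omega)
      rw [show ((j + 1 : Nat) : Int) = (j : Int) + 1 by push_cast; ring] at this
      exact this
    unfold zl
    rw [List.filterMap_cons]
    by_cases h0 : b[j] = 0
    · simp only [hget, h0]
      simp only [beq_iff_eq] at htl ⊢
      unfold zl at htl
      simp [htl]
    · simp only [hget]
      simp only [beq_iff_eq] at htl ⊢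
      unfold zl at htl
      simp [htl, h0]

lemma zerosOf_eq (b : List Int) (N : Int) (h0 : 0 ≤ N) (hlen : N ≤ (b.length : Int)) :
    zerosOf b N = zl b (PySem.List.pyRange 0 N 1) := by
  unfold zerosOf
  rw [PySem.List.slice_to b h0]
  have := bridge_aux b N hlen N.toNat 0 (by omega)
  simpa using this

lemma bloop_cons_cons (x y : Int) (xs ys : List Int) :
    bloop (x :: xs) (y :: ys) = if x != y then decide (x < y) else bloop xs ys := rfl

lemma bloop_nil_left (ys : List Int) : bloop [] ys = decide (ys.length ≤ 0) := by
  cases ys <;> rfl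

lemma bloop_cons_nil (x : Int) (xs : List Int) : bloop (x :: xs) [] = true := by
  simp [bloop]

lemma drop_take_nil_of_none {l : List Int} {n k : Nat} (h : l[k]? = none) :
    (l.take n).drop k = [] := by
  apply List.drop_eq_nil_of_le
  have := List.getElem?_eq_none_iff.mp h
  simp; omega

lemma cmp_eq (b1 b2 : List Int) (N : Int) (hN : 1 < N)
    (h1 : N ≤ (b1.length : Int)) (h2 : N ≤ (b2.length : Int)) :
    ∀ (fuel k : Nat), fuel + k = (N - 1).toNat →
    cmp_go b1 b2 N fuel ((k : Int) + 1)
      = some (bloop (((zl b1 (PySem.List.pyRange 0 N 1)).take (N - 1).toNat).drop k)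
                    (((zl b2 (PySem.List.pyRange 0 N 1)).take (N - 1).toNat).drop k)) := by
  intro fuel
  induction fuel with
  | zero =>
    intro k hk
    have e1 : ((zl b1 (PySem.List.pyRange 0 N 1)).take (N - 1).toNat).drop k = [] := by
      apply List.drop_eq_nil_of_le; simp; omega
    have e2 : ((zl b2 (PySem.List.pyRange 0 N 1)).take (N - 1).toNat).drop k = [] := by
      apply List.drop_eq_nil_of_le; simp; omega
    simp only [cmp_go, e1, e2]
    rw [bloop_nil_left]
    simp
  | succ fuel ih =>
    intro k hk
    have hk' : k < (N - 1).toNat := by omega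
    have w1 := white_at_eq b1 N h1 k
    have w2 := white_at_eq b2 N h2 k
    set Z1 := zl b1 (PySem.List.pyRange 0 N 1) with hZ1def
    set Z2 := zl b2 (PySem.List.pyRange 0 N 1) with hZ2def
    have t1 : (Z1.take (N - 1).toNat)[k]? = Z1[k]? := List.getElem?_take_of_lt hk'
    have t2 : (Z2.take (N - 1).toNat)[k]? = Z2[k]? := List.getElem?_take_of_lt hk'
    have hcast : ((k : Int) + 1) + 1 = ((k + 1 : Nat) : Int) + 1 := by push_cast; ring
    rw [show cmp_go b1 b2 N (fuel + 1) ((k : Int) + 1) =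
        (match white_at b1 ((k : Int) + 1) N, white_at b2 ((k : Int) + 1) N with
         | some v1, some v2 =>
           if v1 > v2 then some false
           else if v2 > v1 then some true
           else cmp_go b1 b2 N fuel (((k : Int) + 1) + 1)
         | _, _ => none) from rfl, w1, w2]
    rcases hg1 : Z1[k]? with _ | x <;> rcases hg2 : Z2[k]? with _ | y
    · -- both none: both exhausted, values N+1
      have d1 : (Z1.take (N - 1).toNat).drop k = [] := drop_take_nil_of_none hg1
      have d2 : (Z2.take (N - 1).toNat).drop k = [] := drop_take_nil_of_none hg2
      have d1' : (Z1.take (N - 1).toNat).drop (k + 1) = [] := drop_take_nil_of_none (by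
        rw [List.getElem?_eq_none_iff] at hg1 ⊢; omega)
      have d2' : (Z2.take (N - 1).toNat).drop (k + 1) = [] := drop_take_nil_of_none (by
        rw [List.getElem?_eq_none_iff] at hg2 ⊢; omega)
      simp only [Option.getD_none]
      rw [if_neg (by omega), if_neg (by omega), hcast,
          ih (k + 1) (by omega), d1, d2, d1', d2']
    · -- Z1 exhausted, Z2 has y : A returns False
      have hy : 0 ≤ y ∧ y < N := zl_mem_lt b2 N y (by
        exact List.mem_of_getElem? hg2)
      have d1 : (Z1.take (N - 1).toNat).drop k = [] := drop_take_nil_of_none hg1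
      have d2 : (Z2.take (N - 1).toNat).drop k = y :: (Z2.take (N - 1).toNat).drop (k + 1) := by
        rw [List.drop_eq_getElem_cons (List.getElem?_eq_some_iff.mp (t2.trans hg2)).1]
        congr 1
        exact (List.getElem?_eq_some_iff.mp (t2.trans hg2)).2
      simp only [Option.getD_none, Option.getD_some]
      rw [if_pos (by omega), d1, d2, bloop_nil_left]
      simp
    · -- Z2 exhausted, Z1 has x : A returns True
      have hx : 0 ≤ x ∧ x < N := zl_mem_lt b1 N x (List.mem_of_getElem? hg1)
      have d2 : (Z2.take (N - 1).toNat).drop k = [] := drop_take_nil_of_none hg2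
      have d1 : (Z1.take (N - 1).toNat).drop k = x :: (Z1.take (N - 1).toNat).drop (k + 1) := by
        rw [List.drop_eq_getElem_cons (List.getElem?_eq_some_iff.mp (t1.trans hg1)).1]
        congr 1
        exact (List.getElem?_eq_some_iff.mp (t1.trans hg1)).2
      simp only [Option.getD_none, Option.getD_some]
      rw [if_neg (by omega), if_pos (by omega), d1, d2, bloop_cons_nil]
    · -- both present
      have d1 : (Z1.take (N - 1).toNat).drop k = x :: (Z1.take (N - 1).toNat).drop (k + 1) := by
        rw [List.drop_eq_getElem_cons (List.getElem?_eq_some_iff.mp (t1.trans hg1)).1]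
        congr 1
        exact (List.getElem?_eq_some_iff.mp (t1.trans hg1)).2
      have d2 : (Z2.take (N - 1).toNat).drop k = y :: (Z2.take (N - 1).toNat).drop (k + 1) := by
        rw [List.drop_eq_getElem_cons (List.getElem?_eq_some_iff.mp (t2.trans hg2)).1]
        congr 1
        exact (List.getElem?_eq_some_iff.mp (t2.trans hg2)).2
      simp only [Option.getD_some]
      rw [d1, d2, bloop_cons_cons]
      by_cases hxy : x = y
      · subst hxy
        rw [if_neg (by omega), if_neg (by omega)]
        rw [hcast, ih (k + 1) (by omega)]
        simp
      · by_cases hlt : x < y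
        · rw [if_neg (by omega), if_pos (by omega)]
          simp [hxy, hlt, bne_iff_ne]
        · rw [if_pos (by omega)]
          simp [hxy, bne_iff_ne]
          omega

-- ===== VERDICT (by name: the statement is the Claim_ definition above) =====
theorem compare_2_boards_spec : Claim_equal_compare_2_boards := by
  intro b1 b2 N _hdom hpre
  unfold Spec_compare_2_boards
  by_cases hN : N ≤ 1
  · have h0 : (N - 1).toNat = 0 := by omega
    simp [compare_2_boards, compare_2_boards_alt, hN, h0, cmp_go]
  · have hN' : 1 < N := by omega
    obtain ⟨h1, h2⟩ : N ≤ (b1.length : Int) ∧ N ≤ (b2.length : Int) := by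
      rcases hpre with h | h
      · omega
      · exact h
    have hmain := cmp_eq b1 b2 N hN' h1 h2 (N - 1).toNat 0 (by omega)
    simp only [Nat.cast_zero, zero_add, List.drop_zero] at hmain
    unfold compare_2_boards compare_2_boards_alt
    rw [hmain, if_neg hN]
    rw [PySem.List.slice_to _ (by omega : (0:Int) ≤ N - 1), PySem.List.slice_to _ (by omega : (0:Int) ≤ N - 1)]
    rw [zerosOf_eq b1 N (by omega) h1, zerosOf_eq b2 N (by omega) h2]
    rfl
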